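-- pv_equiv track=rewrite | github.com/rohitravirane/hirelens-ai | backend/app/resumes/elite_layout_analyzer.py | _find_skills_by_content
-- ===== SOURCE A (Python) =====
-- from typing import Dict, List, Any, Optional, Tuple
--
-- def _find_skills_by_content(lines: List[str]) -> Tuple[Optional[int], Optional[int]]:
--     """Find skills section by technology keywords"""
--     tech_keywords = ['javascript', 'python', 'java', 'react', 'angular', 'node', 'html', 'css', '.net', 'spring', 'django', 'flask']
--
--     start = None
--     tech_count = 0
--
--     for i, line in enumerate(lines):
--         line_lower = line.lower()
--         tech_found = sum(1 for keyword in tech_keywords if keyword in line_lower)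
--
--         if tech_found >= 2:  # At least 2 technologies in line
--             if start is None:
--                 start = i
--             tech_count += tech_found
--         elif start is not None:
--             if tech_count >= 3:  # Found enough technologies
--                 return start, i
--             start = None
--             tech_count = 0
--
--     if start is not None and tech_count >= 3:
--         return start, len(lines)
--
--     return None, None
-- ===== SOURCE B (Python) =====
-- def _find_skills_by_content(lines):
--     """Find skills section by technology keywords"""
--     tech_keywords = ['javascript', 'python', 'java', 'react', 'angular', 'node', 'html', 'css', '.net', 'spring', 'django', 'flask']
--     counts = [sum(1 for k in tech_keywords if k in ln.lower()) for ln in lines]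
--     n = len(counts)
--     i = 0
--     while i < n:
--         if counts[i] >= 2:
--             j = i
--             while j < n and counts[j] >= 2:
--                 j += 1
--             if sum(counts[i:j]) >= 3:
--                 return i, j
--             i = j
--         else:
--             i += 1
--     return None, None
-- ===== Notes on version B (the rewrite author's own statement) =====
-- stated objective: alternative
-- what changed: A's single stateful scan with (start, tech_count) accumulators and mid-loop early returns is replaced by a two-phase algorithm: precompute the per-line keyword counts, then group the count list into maximal runs of count>=2 and return the first run whose sum is >=3.
import Mathlib
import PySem

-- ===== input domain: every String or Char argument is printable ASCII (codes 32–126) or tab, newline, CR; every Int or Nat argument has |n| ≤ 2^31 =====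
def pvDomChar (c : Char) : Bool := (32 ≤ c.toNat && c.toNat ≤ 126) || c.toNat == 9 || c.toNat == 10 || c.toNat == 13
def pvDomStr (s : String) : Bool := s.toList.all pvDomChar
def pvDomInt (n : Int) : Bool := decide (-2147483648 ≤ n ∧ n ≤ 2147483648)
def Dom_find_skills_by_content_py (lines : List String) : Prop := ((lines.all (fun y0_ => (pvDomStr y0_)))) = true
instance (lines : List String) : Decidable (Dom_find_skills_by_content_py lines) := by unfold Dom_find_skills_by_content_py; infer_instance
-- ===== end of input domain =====

-- B re-decomposes A's stateful scan: first a per-line keyword-count list, then a run-grouping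
-- scan over the counts (objective: simpler decomposition, same cost).

-- ===== PORT A =====
-- shared helper: number of tech keywords occurring in the lowercased line
def pvKeywords : List String :=
  ["javascript", "python", "java", "react", "angular", "node", "html", "css", ".net", "spring", "django", "flask"]

def pvTechFound (line : String) : Int :=
  pvKeywords.foldl (fun a k => a + if PySem.Str.isIn k (PySem.Str.lower line) then 1 else 0) 0

-- A's single loop over lines with state (start, tech_count) and early return
def pvGoA (i : Nat) (start : Option Int) (cnt : Int) : List String → Option Int × Option Int
  | [] =>
    match start with
    | some s => if 3 ≤ cnt then (some s, some (i : Int)) else (none, none)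
    | none => (none, none)
  | l :: rest =>
    let tf := pvTechFound l
    if 2 ≤ tf then
      pvGoA (i + 1) (some (start.getD (i : Int))) (cnt + tf) rest
    else
      match start with
      | some s => if 3 ≤ cnt then (some s, some (i : Int)) else pvGoA (i + 1) none 0 rest
      | none => pvGoA (i + 1) none 0 rest

def find_skills_by_content_py (lines : List String) : Option Int × Option Int :=
  pvGoA 0 none 0 lines

-- ===== PORT B =====
-- B: scan of the count list grouping maximal runs of lines with count ≥ 2
def pvGoB (i : Nat) : List Int → Option Int × Option Int
  | [] => (none, none)
  | c :: rest =>
    if 2 ≤ c then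
      let t := rest.takeWhile (fun x => decide (2 ≤ x))
      if 3 ≤ c + t.sum then (some (i : Int), some ((i + 1 + t.length : Nat) : Int))
      else pvGoB (i + 1 + t.length) (rest.dropWhile (fun x => decide (2 ≤ x)))
    else pvGoB (i + 1) rest
  termination_by cs => cs.length
  decreasing_by
    · simpa using Nat.lt_succ_of_le (List.length_dropWhile_le _ rest)
    · simp

def find_skills_by_content_py_alt (lines : List String) : Option Int × Option Int :=
  pvGoB 0 (lines.map pvTechFound)

-- ===== PRECONDITION & SPEC =====
def Spec_find_skills_by_content_py (lines : List String) (out : Option Int × Option Int) : Prop := out = find_skills_by_content_py_alt lines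
instance (lines : List String) (out : Option Int × Option Int) : Decidable (Spec_find_skills_by_content_py lines out) := by unfold Spec_find_skills_by_content_py; infer_instance

-- ===== CLAIM (what is proved, stated in full; the proofs are below) =====
def Claim_equal_find_skills_by_content_py : Prop := ∀ (lines : List String), Dom_find_skills_by_content_py lines → Spec_find_skills_by_content_py lines (find_skills_by_content_py lines)

-- ===== LEMMAS AND PROOFS =====

-- A's loop, re-expressed over the precomputed counts (proof intermediary)
def pvGoA' (i : Nat) (start : Option Int) (cnt : Int) : List Int → Option Int × Option Int
  | [] =>
    match start with
    | some s => if 3 ≤ cnt then (some s, some (i : Int)) else (none, none)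
    | none => (none, none)
  | c :: rest =>
    if 2 ≤ c then
      pvGoA' (i + 1) (some (start.getD (i : Int))) (cnt + c) rest
    else
      match start with
      | some s => if 3 ≤ cnt then (some s, some (i : Int)) else pvGoA' (i + 1) none 0 rest
      | none => pvGoA' (i + 1) none 0 rest

theorem pvGoA_eq (ls : List String) : ∀ i st cnt, pvGoA i st cnt ls = pvGoA' i st cnt (ls.map pvTechFound) := by
  induction ls with
  | nil => intro i st cnt; rfl
  | cons l rest ih =>
    intro i st cnt
    cases st <;> simp only [pvGoA, pvGoA', List.map] <;> split_ifs <;> simp [ih]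

-- inside a run (start = some s), A's loop computes the run sum and ends at the run's end
theorem pvGoA'_run (cs : List Int) : ∀ i (s cnt : Int),
    pvGoA' i (some s) cnt cs =
      (if 3 ≤ cnt + (cs.takeWhile (fun x => decide (2 ≤ x))).sum then
        (some s, some ((i + (cs.takeWhile (fun x => decide (2 ≤ x))).length : Nat) : Int))
      else pvGoA' (i + (cs.takeWhile (fun x => decide (2 ≤ x))).length) none 0
        (cs.dropWhile (fun x => decide (2 ≤ x)))) := by
  induction cs with
  | nil => intro i s cnt; simp [pvGoA']
  | cons c rest ih =>
    intro i s cnt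
    by_cases hc : 2 ≤ c
    · simp only [List.takeWhile_cons, List.dropWhile_cons, hc, decide_true, if_true]
      simp only [pvGoA', if_pos hc, Option.getD, ih, List.sum_cons, List.length_cons]
      rw [show i + 1 + (rest.takeWhile (fun x => decide (2 ≤ x))).length
          = i + ((rest.takeWhile (fun x => decide (2 ≤ x))).length + 1) from by omega,
        show cnt + c + (rest.takeWhile (fun x => decide (2 ≤ x))).sum
          = cnt + (c + (rest.takeWhile (fun x => decide (2 ≤ x))).sum) from by ring]
    · simp only [List.takeWhile_cons, List.dropWhile_cons, hc, decide_false, if_false,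
        Bool.false_eq_true]
      simp only [pvGoA', if_neg hc, List.sum_nil, List.length_nil, add_zero]

theorem pvGoA'_eq_pvGoB : ∀ i (cs : List Int), pvGoA' i none 0 cs = pvGoB i cs := by
  intro i cs
  induction i, cs using pvGoB.induct with
  | case1 => simp [pvGoA', pvGoB]
  | case2 i c rest hc t hs =>
    have hs' : 3 ≤ c + (rest.takeWhile (fun x => decide (2 ≤ x))).sum := hs
    rw [pvGoB]
    simp only [pvGoA', if_pos hc, Option.getD, pvGoA'_run, zero_add, if_pos hs']
  | case3 i c rest hc t hs ih =>
    have hs' : ¬ 3 ≤ c + (rest.takeWhile (fun x => decide (2 ≤ x))).sum := hs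
    rw [pvGoB]
    simp only [pvGoA', if_pos hc, Option.getD, pvGoA'_run, zero_add, if_neg hs']
    exact ih
  | case4 i c rest hc ih =>
    rw [pvGoB]
    simp only [pvGoA', if_neg hc, ih]

-- ===== VERDICT (by name: the statement is the Claim_ definition above) =====
theorem find_skills_by_content_py_spec : Claim_equal_find_skills_by_content_py := by
  intro lines _
  unfold Spec_find_skills_by_content_py find_skills_by_content_py find_skills_by_content_py_alt
  rw [pvGoA_eq, pvGoA'_eq_pvGoB]
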